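-- pv_equiv track=rewrite | github.com/amazon-braket/Braket.jl | examples/ahs/.CondaPkg/env/lib/python3.9/site-packages/braket/analog_hamiltonian_simulator/rydberg/rydberg_simulator_helpers.py | _get_detuning_dict
-- ===== SOURCE A (Python) =====
-- from typing import Dict, List, Tuple
--
-- def _get_detuning_dict(
--     targets: Tuple[int], configurations: List[str]
-- ) -> Dict[Tuple[int, int], float]:
--     """Return the dict contains the detuning operators for a set of target atoms.
--
--     Args:
--         targets (Tuple[int]): The target atoms of the detuning operator
--         configurations (List[str]): The list of configurations that comply with the blockade
--             approximation.
--
--     Returns: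
--         Dict[Tuple[int, int], float]: The dictionary for the detuning operator
--     """
--
--     detuning = {}  # The detuning term in the basis of configurations, as a dictionary
--
--     for ind_1, config in enumerate(configurations):
--         value = sum([1 for ind_2, item in enumerate(config) if item == "r" and ind_2 in targets])
--         if value > 0:
--             detuning[(ind_1, ind_1)] = value
--
--     return detuning
-- ===== SOURCE B (Python) =====
-- def _get_detuning_dict(targets, configurations):
--     # Iterate only over the (deduplicated) target indices instead of scanning
--     # every character of every configuration: O(N*T) instead of O(N*L*T).
--     target_set = set(targets)
--     detuning = {}
--     for ind_1, config in enumerate(configurations):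
--         value = 0
--         n = len(config)
--         for t in target_set:
--             if 0 <= t < n and config[t] == "r":
--                 value += 1
--         if value > 0:
--             detuning[(ind_1, ind_1)] = value
--     return detuning
-- ===== Notes on version B (the rewrite author's own statement) =====
-- stated objective: faster
-- what changed: Instead of scanning every character of each configuration and testing its index against the targets list, B deduplicates targets into a set once and, per configuration, checks only the target positions themselves (bounds check + config[t]=='r').
import Mathlib
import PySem

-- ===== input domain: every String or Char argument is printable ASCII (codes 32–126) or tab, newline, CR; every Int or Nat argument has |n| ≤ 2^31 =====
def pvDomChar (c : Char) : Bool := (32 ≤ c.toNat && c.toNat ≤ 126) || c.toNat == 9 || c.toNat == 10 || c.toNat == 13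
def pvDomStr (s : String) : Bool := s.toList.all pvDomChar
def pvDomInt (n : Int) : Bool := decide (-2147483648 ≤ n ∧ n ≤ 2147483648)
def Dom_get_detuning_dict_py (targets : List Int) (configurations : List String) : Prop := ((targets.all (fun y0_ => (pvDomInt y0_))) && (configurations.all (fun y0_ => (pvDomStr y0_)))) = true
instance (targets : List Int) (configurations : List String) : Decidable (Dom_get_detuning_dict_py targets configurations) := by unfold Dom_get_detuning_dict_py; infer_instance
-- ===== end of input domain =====

-- B iterates only over the deduplicated target positions (set + direct index) instead of
-- scanning every character of every configuration against the targets list.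

-- ===== PORT A =====
-- dict keys (ind_1, ind_1) are fresh at each insertion (ind_1 strictly increases),
-- so the dict in insertion order is exactly the appended list of triples.
def get_detuning_dict_py (targets : List Int) (configurations : List String) : List (Int × Int × Int) :=
  (PySem.List.enumerate configurations).foldl
    (fun detuning p =>
      let value : Int :=
        (((PySem.List.enumerate p.2.toList).filter
            (fun q => q.2 == 'r' && targets.contains q.1)).map (fun _ => (1 : Int))).sum
      if value > 0 then detuning ++ [(p.1, p.1, value)] else detuning) []

-- ===== PORT B =====
def get_detuning_dict_py_alt (targets : List Int) (configurations : List String) : List (Int × Int × Int) :=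
  let target_set : PySem.Set Int := PySem.Set.ofList targets
  (PySem.List.enumerate configurations).foldl
    (fun detuning p =>
      let n : Int := PySem.Str.len p.2
      let value : Int :=
        target_set.foldl
          (fun v t => if 0 ≤ t ∧ t < n ∧ PySem.Str.pyGet? p.2 t == some 'r' then v + 1 else v) 0
      if value > 0 then detuning ++ [(p.1, p.1, value)] else detuning) []

-- ===== PRECONDITION & SPEC =====
def Spec_get_detuning_dict_py (targets : List Int) (configurations : List String) (out : List (Int × Int × Int)) : Prop := out = get_detuning_dict_py_alt targets configurations
instance (targets : List Int) (configurations : List String) (out : List (Int × Int × Int)) : Decidable (Spec_get_detuning_dict_py targets configurations out) := by unfold Spec_get_detuning_dict_py; infer_instance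

-- ===== CLAIM (what is proved, stated in full; the proofs are below) =====
def Claim_equal_get_detuning_dict_py : Prop := ∀ (targets : List Int) (configurations : List String), Dom_get_detuning_dict_py targets configurations → Spec_get_detuning_dict_py targets configurations (get_detuning_dict_py targets configurations)

-- ===== LEMMAS AND PROOFS =====

-- sum of a constant-1 list is its length
theorem pv_sum_ones {α : Type} (l : List α) :
    (l.map (fun _ => (1 : Int))).sum = (l.length : Int) := by
  induction l with
  | nil => simp
  | cons x xs ih =>
    simp only [List.map_cons, List.sum_cons, ih, List.length_cons]
    push_cast; ring

-- Per configuration, A's character scan and B's target scan count the same positions: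
-- both counts are the length of a duplicate-free list of the matching target indices.
theorem pv_core (ts : List Int) (s : String) :
    (((PySem.List.enumerate s.toList).filter
        (fun q => q.2 == 'r' && ts.contains q.1)).map (fun _ => (1 : Int))).sum
    = (PySem.Set.ofList ts).foldl
        (fun v t => if 0 ≤ t ∧ t < PySem.Str.len s ∧ PySem.Str.pyGet? s t == some 'r' then v + 1 else v) 0 := by
  rw [pv_sum_ones, PySem.List.foldl_ite_add_one, zero_add]
  congr 1
  set cs := s.toList with hcs
  set pA : Int × Char → Bool := fun q => q.2 == 'r' && ts.contains q.1 with hpA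
  set pB : Int → Bool := fun t =>
      decide (0 ≤ t ∧ t < PySem.Str.len s ∧ PySem.Str.pyGet? s t == some 'r') with hpB
  have hlen : PySem.Str.len s = (cs.length : Int) := PySem.Str.len_eq s
  -- A's count is the length of the duplicate-free list of counted indices
  have hNA : (((PySem.List.enumerate cs).filter pA).map (·.1)).Nodup := by
    have h := PySem.List.pairwise_lt_enumerate (xs := cs) (s := 0)
    rw [List.Nodup, List.pairwise_map]
    exact (h.filter _).imp (fun h => ne_of_lt h)
  have hNB : ((PySem.Set.ofList ts : List Int).filter pB).Nodup :=
    (PySem.Set.nodup_ofList ts).filter _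
  -- the two index lists have the same members
  have hmem : ∀ t : Int, t ∈ ((PySem.List.enumerate cs).filter pA).map (·.1)
      ↔ t ∈ (PySem.Set.ofList ts : List Int).filter pB := by
    intro t
    have hL : t ∈ ((PySem.List.enumerate cs).filter pA).map (·.1)
        ↔ ∃ k : Nat, ∃ h : k < cs.length, t = (k : Int) ∧ cs[k] = 'r' ∧ t ∈ ts := by
      simp only [List.mem_map, List.mem_filter, PySem.List.mem_enumerate_iff, hpA]
      constructor
      · rintro ⟨q, ⟨⟨k, hk, rfl⟩, hq⟩, rfl⟩
        simp only [Bool.and_eq_true, beq_iff_eq, List.contains_eq_mem, decide_eq_true_eq] at hq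
        exact ⟨k, hk, by simp, hq.1, by simpa using hq.2⟩
      · rintro ⟨k, hk, rfl, hr, hts⟩
        refine ⟨((k : Int), cs[k]), ⟨⟨k, hk, by simp⟩, ?_⟩, rfl⟩
        simp [hr, hts]
    rw [hL, List.mem_filter, PySem.Set.mem_ofList, hpB]
    simp only [decide_eq_true_eq]
    constructor
    · rintro ⟨k, hk, rfl, hr, hts⟩
      refine ⟨hts, by positivity, by rw [hlen]; exact_mod_cast hk, ?_⟩
      rw [show PySem.Str.pyGet? s (k : Int) = PySem.List.pyGet? cs (k : Int) from rfl,
          PySem.List.pyGet?_natCast]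
      simp [List.getElem?_eq_getElem hk, hr]
    · rintro ⟨hts, h0, h1, hg⟩
      rw [hlen] at h1
      have hk : t.toNat < cs.length := by omega
      rw [show PySem.Str.pyGet? s t = PySem.List.pyGet? cs t from rfl,
          PySem.List.pyGet?_eq_some_getElem cs h0 h1] at hg
      refine ⟨t.toNat, hk, (Int.toNat_of_nonneg h0).symm, ?_, hts⟩
      simpa using hg
  calc (List.filter pA (PySem.List.enumerate cs)).length
      = (((PySem.List.enumerate cs).filter pA).map (·.1)).length := (List.length_map _).symm
    _ = ((PySem.Set.ofList ts : List Int).filter pB).length :=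
        ((List.perm_ext_iff_of_nodup hNA hNB).mpr hmem).length_eq
    _ = List.countP pB (PySem.Set.ofList ts) := List.countP_eq_length_filter.symm

-- ===== VERDICT (by name: the statement is the Claim_ definition above) =====
theorem get_detuning_dict_py_spec : Claim_equal_get_detuning_dict_py := by
  intro targets configurations _
  unfold Spec_get_detuning_dict_py get_detuning_dict_py get_detuning_dict_py_alt
  congr 1
  funext detuning p
  simp only [pv_core targets p.2]
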